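-- pv_equiv track=rewrite | github.com/Hwang-Junsu/Coding_Test | Programmers/Python/Lv.2/양궁대회.py | solution
-- ===== SOURCE A (Python) =====
-- from itertools import combinations
--
-- def score_cal(rion, apeach) :
--     rs = 0
--     aps = 0
--
--     for i in range(10, -1 ,-1) :
--         if rion[10-i] == 0 and apeach[10-i] == 0 :
--             continue
--         if rion[10-i] > apeach[10-i] :
--             rs += i
--         elif apeach[10-i] != 0 and rion[10-i] <= apeach[10-i] :
--             aps += i
--
--     return rs-aps
--
-- def shoot(donts, n, apeach) :
--     index = 0
--     rion = [0,0,0,0,0,0,0,0,0,0,0]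
--     while n != 0 :
--         if index not in donts and n > apeach[index] :
--             rion[index] = apeach[index] + 1
--             n -= apeach[index] + 1
--         index += 1
--
--         if index == 11 :
--             if n > 0 :
--                 rion[10] += n
--             return rion
--
--     return rion
--
-- def index_cal(rion) :
--     score = 0
--     index_score = [1,2,3,4,5,6,7,8,9,10,11]
--     for i in range(len(rion)) :
--         score += (rion[i]*index_score[i])
--     return score
--
-- def solution(n, info):
--     answer = []
--     score_index = [0,1,2,3,4,5,6,7,8,9,10]
--     dontshoot = []
--
--     mx = -1000
--     index_to_score = 0
--     for i in range(0,12) :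
--         for combi in combinations(score_index, i) :
--             dontshoot.append(combi)
--
--     for dont in dontshoot :
--         arr = shoot(dont, n, info)
--         if mx == score_cal(arr,info) :
--             if index_cal(arr) > index_cal(answer) :
--                 answer = arr
--                 mx = max(mx, score_cal(arr, info))
--         elif mx < score_cal(arr, info)  :
--             answer = arr
--             mx = max(mx, score_cal(arr, info))
--
--     if mx < 1 :
--         return [-1]
--
--     return answer
-- ===== SOURCE B (Python) =====
-- from itertools import combinations
--
-- RINGS = 11
--
--
-- def evaluate(i, budget, skip, info):
--     """Rings i..10: spend greedily on the non-conceded rings, dump any leftover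
--     on ring 10, and return (allocation, score difference, low-ring tie weight)
--     for the suffix, all computed in one recursive pass."""
--     if i == RINGS:
--         return [], 0, 0
--     ap = info[i]
--     shot = ap + 1 if (budget != 0 and i not in skip and budget > ap) else 0
--     rest, diff, weight = evaluate(i + 1, budget - shot, skip, info)
--     if i == RINGS - 1 and budget - shot > 0:
--         shot += budget - shot
--     points = 10 - i
--     if shot > ap:
--         diff += points
--     elif ap != 0:
--         diff -= points
--     return [shot] + rest, diff, weight + shot * (i + 1)
--
--
-- def solution(n, info):
--     best = None
--     for k in range(RINGS + 1):
--         for skip in combinations(range(RINGS), k):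
--             arr, diff, weight = evaluate(0, n, skip, info)
--             if best is None or (diff, weight) > (best[0], best[1]):
--                 best = (diff, weight, arr)
--     return best[2] if best[0] >= 1 else [-1]
-- ===== Notes on version B (the rewrite author's own statement) =====
-- stated objective: alternative
-- what changed: Per candidate concede-set, A mutates an 11-slot array in a while loop (shoot) and then makes three more passes over it (score_cal twice-per-branch and index_cal, plus an mx/max bookkeeping dance); B evaluates each candidate in a single recursive pass over the rings that builds the allocation and computes the score difference and the low-ring tie weight simultaneously, and tracks the best candidate by one lexicographic key comparison.
import Mathlib
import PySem

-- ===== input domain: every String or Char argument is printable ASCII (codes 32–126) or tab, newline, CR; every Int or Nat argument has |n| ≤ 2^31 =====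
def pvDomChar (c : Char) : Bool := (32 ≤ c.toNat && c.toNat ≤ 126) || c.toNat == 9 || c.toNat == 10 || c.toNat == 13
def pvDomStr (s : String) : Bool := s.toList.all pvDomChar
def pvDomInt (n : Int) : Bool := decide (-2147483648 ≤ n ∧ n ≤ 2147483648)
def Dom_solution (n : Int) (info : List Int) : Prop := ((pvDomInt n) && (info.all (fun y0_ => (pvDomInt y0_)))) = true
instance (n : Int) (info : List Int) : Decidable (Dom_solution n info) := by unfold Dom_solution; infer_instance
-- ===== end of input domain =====

-- B replaces A's per-candidate greedy mutation loop plus three separate scoring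
-- passes by one recursive pass per candidate that builds the allocation and both
-- ranking keys together (objective: alternative, same brute-force enumeration order).

-- ===== PORT A =====
-- shoot's while loop; fuel = 11 - index (the loop body returns at index 11, so
-- fuel 11 is never exhausted; the fuel-0 branch only makes the recursion structural).
def shootGo (donts : List Int) (apeach : List Int) : Nat → Nat → Int → List Int → List Int
  | 0, _, _, rion => rion
  | f + 1, idx, n, rion =>
    if n = 0 then rion
    else
      let ap := PySem.List.pyGetD apeach (idx : Int) 0
      let take := ¬ ((idx : Int) ∈ donts) ∧ n > ap
      let rion' := if take then rion.set idx (ap + 1) else rion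
      let n' := if take then n - (ap + 1) else n
      if idx + 1 = 11 then
        if n' > 0 then rion'.set 10 (PySem.List.pyGetD rion' 10 0 + n') else rion'
      else shootGo donts apeach f (idx + 1) n' rion'

def shoot (donts : List Int) (n : Int) (apeach : List Int) : List Int :=
  shootGo donts apeach 11 0 n [0,0,0,0,0,0,0,0,0,0,0]

def score_cal (rion : List Int) (apeach : List Int) : Int :=
  let p := (PySem.List.pyRange 10 (-1) (-1)).foldl (fun (s : Int × Int) i =>
    let r := PySem.List.pyGetD rion (10 - i) 0
    let a := PySem.List.pyGetD apeach (10 - i) 0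
    if r = 0 ∧ a = 0 then s
    else if r > a then (s.1 + i, s.2)
    else if a ≠ 0 ∧ r ≤ a then (s.1, s.2 + i)
    else s) (0, 0)
  p.1 - p.2

def index_cal (rion : List Int) : Int :=
  (PySem.List.pyRange 0 (PySem.List.len rion) 1).foldl
    (fun score i =>
      score + PySem.List.pyGetD rion i 0 * PySem.List.pyGetD ([1,2,3,4,5,6,7,8,9,10,11] : List Int) i 0) 0

def solution (n : Int) (info : List Int) : List Int :=
  let scoreIndex : List Int := [0,1,2,3,4,5,6,7,8,9,10]
  let dontshoot : List (List Int) := (PySem.List.pyRange 0 12 1).foldl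
    (fun acc i => acc ++ PySem.List.combinations scoreIndex i.toNat) []
  let st := dontshoot.foldl (fun (st : List Int × Int) dont =>
    let arr := shoot dont n info
    if st.2 = score_cal arr info then
      if index_cal arr > index_cal st.1 then (arr, max st.2 (score_cal arr info)) else st
    else if st.2 < score_cal arr info then (arr, max st.2 (score_cal arr info))
    else st) ([], -1000)
  if st.2 < 1 then [-1] else st.1

-- ===== PORT B =====
-- Source B's `evaluate`: one recursive pass over rings i..10; fuel = 11 - i
-- (fuel 0 is exactly Python's base case i == RINGS).
def evaluateB (info : List Int) (skip : List Int) : Nat → Nat → Int → List Int × Int × Int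
  | 0, _, _ => ([], 0, 0)
  | f + 1, i, budget =>
    let ap := PySem.List.pyGetD info (i : Int) 0
    let shot0 : Int := if budget ≠ 0 ∧ ¬ ((i : Int) ∈ skip) ∧ budget > ap then ap + 1 else 0
    let r := evaluateB info skip f (i + 1) (budget - shot0)
    let shot := if i = 10 ∧ budget - shot0 > 0 then shot0 + (budget - shot0) else shot0
    let points : Int := 10 - (i : Int)
    let diff := if shot > ap then r.2.1 + points else if ap ≠ 0 then r.2.1 - points else r.2.1
    (shot :: r.1, diff, r.2.2 + shot * ((i : Int) + 1))

-- the loop body of Source B's scan: challenge the running best with one skip-set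
def altStep (n : Int) (info : List Int) (best : Option (Int × Int × List Int)) (skip : List Int) :
    Option (Int × Int × List Int) :=
  let r := evaluateB info skip 11 0 n
  match best with
  | none => some (r.2.1, r.2.2, r.1)
  | some b =>
    if r.2.1 > b.1 ∨ (r.2.1 = b.1 ∧ r.2.2 > b.2.1) then some (r.2.1, r.2.2, r.1)
    else some b

-- Source B's final `return best[2] if best[0] >= 1 else [-1]`
def finishB (best : Option (Int × Int × List Int)) : List Int :=
  match best with
  | none => [-1]
  | some b => if b.1 ≥ 1 then b.2.2 else [-1]

def solution_alt (n : Int) (info : List Int) : List Int :=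
  finishB ((PySem.List.pyRange 0 12 1).foldl (fun best k =>
    (PySem.List.combinations (PySem.List.pyRange 0 11 1) k.toNat).foldl (altStep n info) best) none)

-- ===== PRECONDITION & SPEC =====
-- Python A indexes info[0]..info[10] unconditionally, so it raises IndexError
-- exactly when len(info) < 11; those inputs are excluded.
def Pre_solution (n : Int) (info : List Int) : Prop := 11 ≤ info.length
instance (n : Int) (info : List Int) : Decidable (Pre_solution n info) := by unfold Pre_solution; infer_instance

def pvWitness_solution : Int × List Int := (5, [2,1,1,1,0,0,0,0,0,0,0])

def Spec_solution (n : Int) (info : List Int) (out : List Int) : Prop := out = solution_alt n info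
instance (n : Int) (info : List Int) (out : List Int) : Decidable (Spec_solution n info out) := by unfold Spec_solution; infer_instance

-- ===== CLAIM (what is proved, stated in full; the proofs are below) =====
def Claim_equal_solution : Prop := ∀ (n : Int) (info : List Int), Dom_solution n info → Pre_solution n info → Spec_solution n info (solution n info)

-- ===== LEMMAS AND PROOFS =====

-- spec helpers (proof-only): per-ring score contribution and the two ranking keys
-- of a suffix of the allocation, written ring by ring.
def contrib (r ap p : Int) : Int := if r > ap then p else if ap ≠ 0 then -p else 0

def scs (info : List Int) : Nat → List Int → Int
  | _, [] => 0
  | i, r :: t =>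
    let ap := PySem.List.pyGetD info (i : Int) 0
    let p : Int := 10 - (i : Int)
    if r > ap then scs info (i + 1) t + p else if ap ≠ 0 then scs info (i + 1) t - p else scs info (i + 1) t

def ws : Nat → List Int → Int
  | _, [] => 0
  | i, r :: t => ws (i + 1) t + r * ((i : Int) + 1)

lemma scs_cons (info : List Int) (i : Nat) (r : Int) (t : List Int) :
    scs info i (r :: t) = contrib r (PySem.List.pyGetD info (i : Int) 0) (10 - (i : Int)) + scs info (i + 1) t := by
  simp only [scs, contrib]
  split_ifs <;> ring

-- B's diff and weight are exactly the two spec keys of its own allocation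
lemma eval_keys (info skip : List Int) : ∀ (f i : Nat) (b : Int),
    (evaluateB info skip f i b).2.1 = scs info i (evaluateB info skip f i b).1 ∧
    (evaluateB info skip f i b).2.2 = ws i (evaluateB info skip f i b).1 := by
  intro f
  induction f with
  | zero => intro i b; simp [evaluateB, scs, ws]
  | succ f ih =>
    intro i b
    simp only [evaluateB, scs, ws]
    obtain ⟨h1, h2⟩ := ih (i + 1) (b - (if b ≠ 0 ∧ ¬ ((i : Int) ∈ skip) ∧ b > PySem.List.pyGetD info (i : Int) 0 then PySem.List.pyGetD info (i : Int) 0 + 1 else 0))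
    constructor
    · simp only [h1]
    · simp only [h2]

lemma eval_len (info skip : List Int) : ∀ (f i : Nat) (b : Int),
    (evaluateB info skip f i b).1.length = f := by
  intro f
  induction f with
  | zero => intro i b; simp [evaluateB]
  | succ f ih => intro i b; simp [evaluateB, ih]

lemma eval_budget_zero (info skip : List Int) : ∀ (f i : Nat),
    (evaluateB info skip f i 0).1 = List.replicate f 0 := by
  intro f
  induction f with
  | zero => intro i; simp [evaluateB]
  | succ f ih => intro i; simp [evaluateB, ih, List.replicate_succ]

-- A's greedy loop produces exactly B's allocation
lemma shootGo_eq_eval (skip info : List Int) : ∀ (f i : Nat) (b : Int) (pre : List Int),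
    pre.length = i → i + f = 11 →
    shootGo skip info f i b (pre ++ List.replicate f 0) = pre ++ (evaluateB info skip f i b).1 := by
  intro f
  induction f with
  | zero => intro i b pre _ _; simp [shootGo, evaluateB]
  | succ f ih =>
    intro i b pre hpre hif
    simp only [shootGo, evaluateB]
    by_cases hb : b = 0
    · subst hb
      rw [if_pos rfl]
      have hc : ¬ ((0:Int) ≠ 0 ∧ ¬ ((i : Int) ∈ skip) ∧ (0:Int) > PySem.List.pyGetD info (i : Int) 0) := by
        simp
      rw [if_neg hc]
      simp [eval_budget_zero, List.replicate_succ]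
    · rw [if_neg hb]
      set ap := PySem.List.pyGetD info (i : Int) 0 with hap
      have hguard : (b ≠ 0 ∧ ¬ ((i : Int) ∈ skip) ∧ b > ap) ↔ (¬ ((i : Int) ∈ skip) ∧ b > ap) := by
        tauto
      by_cases hg : ¬ ((i : Int) ∈ skip) ∧ b > ap
      · -- ring i is won: shot0 = ap + 1
        rw [if_pos hg, if_pos hg, if_pos (hguard.mpr hg)]
        have hset : (pre ++ List.replicate (f + 1) 0).set i (ap + 1) = (pre ++ [ap + 1]) ++ List.replicate f 0 := by
          rw [List.replicate_succ, ← hpre]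
          simp
        rw [hset]
        by_cases hi : i + 1 = 11
        · -- last ring: f = 0
          have hf0 : f = 0 := by omega
          have hi10 : i = 10 := by omega
          subst hf0
          rw [if_pos hi]
          simp only [evaluateB]
          have hget : PySem.List.pyGetD ((pre ++ [ap + 1]) ++ List.replicate 0 0) 10 0 = ap + 1 := by
            have : ((10:Int)) = ((pre.length : Nat) : Int) := by rw [hpre, hi10]; norm_num
            rw [this, PySem.List.pyGetD_natCast]
            simp
          have hsetd : ((pre ++ [ap + 1]) ++ List.replicate 0 0).set 10 (ap + 1 + (b - (ap + 1))) = pre ++ [ap + 1 + (b - (ap + 1))] := by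
            have h10 : 10 = pre.length := by omega
            rw [h10]
            simp
          by_cases hn' : b - (ap + 1) > 0
          · rw [if_pos hn', hget, hsetd]
            simp [hi10]
            omega
          · rw [if_neg hn']
            simp [hi10]
            omega
        · -- not last: recurse
          rw [if_neg hi]
          have hrec : shootGo skip info f (i+1) (b - (ap+1)) ((pre ++ [ap+1]) ++ List.replicate f 0)
              = (pre ++ [ap+1]) ++ (evaluateB info skip f (i+1) (b - (ap+1))).1 := by
            apply ih
            · simp [hpre]
            · omega
          rw [hrec]
          have hi10 : ¬ (i = 10) := by omega
          simp [hi10]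
      · -- ring i not won: shot0 = 0
        rw [if_neg hg, if_neg hg, if_neg (fun h => hg (hguard.mp h))]
        by_cases hi : i + 1 = 11
        · have hf0 : f = 0 := by omega
          have hi10 : i = 10 := by omega
          subst hf0
          simp only [evaluateB]
          rw [if_pos hi]
          have hget : PySem.List.pyGetD (pre ++ List.replicate 1 0) 10 0 = 0 := by
            have : ((10:Int)) = ((pre.length : Nat) : Int) := by rw [hpre, hi10]; norm_num
            rw [this, PySem.List.pyGetD_natCast]
            simp
          by_cases hn' : b > 0
          · rw [if_pos hn', hget]
            have hb' : b - (0:Int) > 0 := by omega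
            simp only [hi10, hb', and_self, if_true]
            have hsetd : (pre ++ List.replicate 1 0).set 10 (0 + (b - 0)) = pre ++ [0 + (b - 0)] := by
              have h10 : 10 = pre.length := by omega
              rw [h10]
              simp [List.replicate_succ]
            rw [show (0:Int) + (b - 0) = 0 + b by ring] at hsetd ⊢
            rw [hsetd]
          · rw [if_neg hn']
            have hb' : ¬ ((b:Int) - 0 > 0) := by omega
            simp [hi10, List.replicate_succ]
            omega
        · rw [if_neg hi]
          have hrec : shootGo skip info f (i+1) b ((pre ++ [0]) ++ List.replicate f 0)
              = (pre ++ [0]) ++ (evaluateB info skip f (i+1) b).1 := by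
            apply ih
            · simp [hpre]
            · omega
          have hrep : pre ++ List.replicate (f + 1) 0 = (pre ++ [0]) ++ List.replicate f 0 := by
            simp [List.replicate_succ]
          rw [hrep, hrec]
          have hi10 : ¬ (i = 10) := by omega
          simp [hi10]

lemma shoot_eq_eval (skip info : List Int) (b : Int) :
    shoot skip b info = (evaluateB info skip 11 0 b).1 := by
  have h := shootGo_eq_eval skip info 11 0 b [] rfl rfl
  simpa [shoot] using h

-- score_cal as a plain sum of per-ring contributions (any rion / apeach)
lemma score_fold (rion apeach : List Int) : ∀ (l : List Int) (s : Int × Int),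
    (l.foldl (fun (s : Int × Int) i =>
      let r := PySem.List.pyGetD rion (10 - i) 0
      let a := PySem.List.pyGetD apeach (10 - i) 0
      if r = 0 ∧ a = 0 then s
      else if r > a then (s.1 + i, s.2)
      else if a ≠ 0 ∧ r ≤ a then (s.1, s.2 + i)
      else s) s).1 - (l.foldl (fun (s : Int × Int) i =>
      let r := PySem.List.pyGetD rion (10 - i) 0
      let a := PySem.List.pyGetD apeach (10 - i) 0
      if r = 0 ∧ a = 0 then s
      else if r > a then (s.1 + i, s.2)
      else if a ≠ 0 ∧ r ≤ a then (s.1, s.2 + i)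
      else s) s).2
    = s.1 - s.2 + (l.map (fun i =>
        contrib (PySem.List.pyGetD rion (10 - i) 0) (PySem.List.pyGetD apeach (10 - i) 0) i)).sum := by
  intro l
  induction l with
  | nil => intro s; simp
  | cons x t ih =>
    intro s
    simp only [List.foldl_cons, List.map_cons, List.sum_cons]
    rw [ih]
    unfold contrib
    split_ifs <;> simp <;> omega

lemma score_cal_sum (rion apeach : List Int) :
    score_cal rion apeach =
      ((PySem.List.pyRange 10 (-1) (-1)).map (fun i =>
        contrib (PySem.List.pyGetD rion (10 - i) 0) (PySem.List.pyGetD apeach (10 - i) 0) i)).sum := by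
  have h := score_fold rion apeach (PySem.List.pyRange 10 (-1) (-1)) (0, 0)
  simpa [score_cal] using h

lemma contrib_ge (r a p : Int) (h : 0 ≤ p) : -p ≤ contrib r a p := by
  unfold contrib; split_ifs <;> omega

lemma score_cal_gt (rion apeach : List Int) : -1000 < score_cal rion apeach := by
  rw [score_cal_sum]
  rw [show PySem.List.pyRange 10 (-1) (-1) = [10,9,8,7,6,5,4,3,2,1,0] from by decide]
  simp only [List.map_cons, List.map_nil, List.sum_cons, List.sum_nil]
  have h10 := contrib_ge (PySem.List.pyGetD rion (10-10) 0) (PySem.List.pyGetD apeach (10-10) 0) 10 (by norm_num)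
  have h9 := contrib_ge (PySem.List.pyGetD rion (10-9) 0) (PySem.List.pyGetD apeach (10-9) 0) 9 (by norm_num)
  have h8 := contrib_ge (PySem.List.pyGetD rion (10-8) 0) (PySem.List.pyGetD apeach (10-8) 0) 8 (by norm_num)
  have h7 := contrib_ge (PySem.List.pyGetD rion (10-7) 0) (PySem.List.pyGetD apeach (10-7) 0) 7 (by norm_num)
  have h6 := contrib_ge (PySem.List.pyGetD rion (10-6) 0) (PySem.List.pyGetD apeach (10-6) 0) 6 (by norm_num)
  have h5 := contrib_ge (PySem.List.pyGetD rion (10-5) 0) (PySem.List.pyGetD apeach (10-5) 0) 5 (by norm_num)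
  have h4 := contrib_ge (PySem.List.pyGetD rion (10-4) 0) (PySem.List.pyGetD apeach (10-4) 0) 4 (by norm_num)
  have h3 := contrib_ge (PySem.List.pyGetD rion (10-3) 0) (PySem.List.pyGetD apeach (10-3) 0) 3 (by norm_num)
  have h2 := contrib_ge (PySem.List.pyGetD rion (10-2) 0) (PySem.List.pyGetD apeach (10-2) 0) 2 (by norm_num)
  have h1 := contrib_ge (PySem.List.pyGetD rion (10-1) 0) (PySem.List.pyGetD apeach (10-1) 0) 1 (by norm_num)
  have h0 := contrib_ge (PySem.List.pyGetD rion (10-0) 0) (PySem.List.pyGetD apeach (10-0) 0) 0 (by norm_num)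
  linarith

-- on an 11-entry allocation, score_cal is the spec key scs
lemma score_cal_eq_scs (info : List Int) (arr : List Int) (h : arr.length = 11) :
    score_cal arr info = scs info 0 arr := by
  rcases arr with _ | ⟨a0, arr⟩; · simp at h
  rcases arr with _ | ⟨a1, arr⟩; · simp at h
  rcases arr with _ | ⟨a2, arr⟩; · simp at h
  rcases arr with _ | ⟨a3, arr⟩; · simp at h
  rcases arr with _ | ⟨a4, arr⟩; · simp at h
  rcases arr with _ | ⟨a5, arr⟩; · simp at h
  rcases arr with _ | ⟨a6, arr⟩; · simp at h
  rcases arr with _ | ⟨a7, arr⟩; · simp at h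
  rcases arr with _ | ⟨a8, arr⟩; · simp at h
  rcases arr with _ | ⟨a9, arr⟩; · simp at h
  rcases arr with _ | ⟨a10, arr⟩; · simp at h
  rcases arr with _ | ⟨a11, arr⟩; swap; · simp at h
  rw [score_cal_sum]
  rw [show PySem.List.pyRange 10 (-1) (-1) = [10,9,8,7,6,5,4,3,2,1,0] from by decide]
  have hnil : ∀ i, scs info i [] = 0 := fun i => rfl
  simp only [scs_cons, hnil]
  norm_num [PySem.List.pyGetD_ofNat', PySem.List.pyGetD_zero_cons]

lemma index_cal_eq_ws (arr : List Int) (h : arr.length = 11) :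
    index_cal arr = ws 0 arr := by
  rcases arr with _ | ⟨a0, arr⟩; · simp at h
  rcases arr with _ | ⟨a1, arr⟩; · simp at h
  rcases arr with _ | ⟨a2, arr⟩; · simp at h
  rcases arr with _ | ⟨a3, arr⟩; · simp at h
  rcases arr with _ | ⟨a4, arr⟩; · simp at h
  rcases arr with _ | ⟨a5, arr⟩; · simp at h
  rcases arr with _ | ⟨a6, arr⟩; · simp at h
  rcases arr with _ | ⟨a7, arr⟩; · simp at h
  rcases arr with _ | ⟨a8, arr⟩; · simp at h
  rcases arr with _ | ⟨a9, arr⟩; · simp at h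
  rcases arr with _ | ⟨a10, arr⟩; · simp at h
  rcases arr with _ | ⟨a11, arr⟩; swap; · simp at h
  show index_cal [a0,a1,a2,a3,a4,a5,a6,a7,a8,a9,a10] = _
  rw [index_cal]
  rw [show PySem.List.len [a0,a1,a2,a3,a4,a5,a6,a7,a8,a9,a10] = (11:Int) from by simp [PySem.List.len_eq]]
  rw [show PySem.List.pyRange 0 11 1 = [0,1,2,3,4,5,6,7,8,9,10] from by decide]
  simp only [List.foldl_cons, List.foldl_nil]
  norm_num [ws, PySem.List.pyGetD_ofNat', PySem.List.pyGetD_zero_cons]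
  ring

-- per-candidate: B's one recursive pass computes A's (shoot, score_cal, index_cal)
lemma eval_spec (info skip : List Int) (n : Int) :
    evaluateB info skip 11 0 n =
      (shoot skip n info, score_cal (shoot skip n info) info, index_cal (shoot skip n info)) := by
  have harr := shoot_eq_eval skip info n
  have hk := eval_keys info skip 11 0 n
  have hl := eval_len info skip 11 0 n
  refine Prod.ext ?_ (Prod.ext ?_ ?_)
  · exact harr.symm
  · rw [harr, hk.1, score_cal_eq_scs info _ hl]
  · rw [harr, hk.2, index_cal_eq_ws _ hl]

-- the two loop bodies of the main scans, and the candidate list both scans traverse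
def stepA (n : Int) (info : List Int) : List Int × Int → List Int → List Int × Int :=
  fun st dont =>
    let arr := shoot dont n info
    if st.2 = score_cal arr info then
      if index_cal arr > index_cal st.1 then (arr, max st.2 (score_cal arr info)) else st
    else if st.2 < score_cal arr info then (arr, max st.2 (score_cal arr info))
    else st

def cands : List (List Int) :=
  (PySem.List.pyRange 0 12 1).flatMap (fun i => PySem.List.combinations ([0,1,2,3,4,5,6,7,8,9,10] : List Int) i.toNat)

lemma solution_eq (n : Int) (info : List Int) :
    solution n info =
      (if (cands.foldl (stepA n info) ([], -1000)).2 < 1 then [-1]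
       else (cands.foldl (stepA n info) ([], -1000)).1) := by
  simp only [solution]
  rw [PySem.List.foldl_append_eq_flatMap]
  rfl

set_option maxRecDepth 4000 in
lemma solution_alt_eq (n : Int) (info : List Int) :
    solution_alt n info = finishB (cands.foldl (altStep n info) none) := by
  simp only [solution_alt,
    show PySem.List.pyRange 0 11 1 = ([0,1,2,3,4,5,6,7,8,9,10] : List Int) from by decide]
  rw [← List.foldl_flatMap]
  unfold finishB cands altStep
  rfl

-- relation between the two scan states
def SRel (info : List Int) (st : List Int × Int) (b : Option (Int × Int × List Int)) : Prop :=
  (st = ([], -1000) ∧ b = none) ∨ b = some (st.2, index_cal st.1, st.1)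

lemma step_rel (n : Int) (info skip : List Int) (st : List Int × Int) (b : Option (Int × Int × List Int))
    (h : SRel info st b) : SRel info (stepA n info st skip) (altStep n info b skip) := by
  have hev := eval_spec info skip n
  set arr := shoot skip n info with harr
  set s := score_cal arr info with hs
  set w := index_cal arr with hw
  rcases h with ⟨hst, hb⟩ | hb
  · subst hst hb
    have hgt : (-1000 : Int) < s := score_cal_gt arr info
    right
    simp only [stepA, altStep, hev]
    rw [if_neg (by omega : ¬ ((-1000 : Int) = s)), if_pos hgt]
    refine congrArg some ?_
    refine Prod.ext ?_ rfl
    show s = max (-1000) (score_cal (shoot skip n info) info)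
    rw [← harr, ← hs]
    exact (max_eq_right (le_of_lt hgt)).symm
  · subst hb
    right
    simp only [stepA, altStep, hev]
    by_cases h1 : st.2 = s
    · rw [if_pos h1]
      by_cases h2 : w > index_cal st.1
      · rw [if_pos h2, if_pos (by right; exact ⟨h1.symm, h2⟩)]
        refine congrArg some ?_
        refine Prod.ext ?_ rfl
        show s = max st.2 (score_cal (shoot skip n info) info)
        rw [← harr, ← hs, h1]
        exact (max_self s).symm
      · rw [if_neg h2, if_neg (by rintro (hlt | ⟨-, hw2⟩); omega; exact h2 hw2)]
    · rw [if_neg h1]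
      by_cases h3 : st.2 < s
      · rw [if_pos h3, if_pos (Or.inl h3)]
        refine congrArg some ?_
        refine Prod.ext ?_ rfl
        show s = max st.2 (score_cal (shoot skip n info) info)
        rw [← harr, ← hs]
        exact (max_eq_right (le_of_lt h3)).symm
      · rw [if_neg h3, if_neg (by rintro (hlt | ⟨heq, -⟩); exact h3 hlt; exact h1 heq.symm)]

lemma fold_rel (n : Int) (info : List Int) : ∀ (l : List (List Int)) (st : List Int × Int) (b : Option (Int × Int × List Int)),
    SRel info st b → SRel info (l.foldl (stepA n info) st) (l.foldl (altStep n info) b) := by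
  intro l
  induction l with
  | nil => intro st b h; exact h
  | cons x t ih => intro st b h; exact ih _ _ (step_rel n info x st b h)

set_option maxRecDepth 4000 in
theorem solution_spec : Claim_equal_solution := by
  intro n info _ _
  show solution n info = solution_alt n info
  rw [solution_eq, solution_alt_eq]
  have h := fold_rel n info cands ([], -1000) none (Or.inl ⟨rfl, rfl⟩)
  obtain ⟨p, hpeq⟩ : ∃ p, cands.foldl (stepA n info) ([], -1000) = p := ⟨_, rfl⟩
  obtain ⟨q, hqeq⟩ : ∃ q, cands.foldl (altStep n info) none = q := ⟨_, rfl⟩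
  rw [hpeq, hqeq] at h ⊢
  rcases h with ⟨hst, hb⟩ | hb
  · subst hst
    subst hb
    rfl
  · subst hb
    show (if p.2 < 1 then [-1] else p.1) = finishB (some (p.2, index_cal p.1, p.1))
    simp only [finishB]
    split_ifs <;> first | rfl | omega
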